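-- pv_equiv track=rewrite | github.com/erxiaozhou/spec2tcs | process_text/raw_processor.py | process_char_bracket_fmt
-- ===== SOURCE A (Python) =====
-- def process_char_bracket_fmt(content):
--     to_replace_pairs = {}
--     to_match = []
--     for i in range(len(content)):
--         c = content[i]
--         if c == '{':
--             to_replace_pairs[i] = -1
--             to_match.append(i)
--         if c == '}':
--             match_i = to_match.pop(-1)
--             to_replace_pairs[match_i] = i
--     assert len(to_match) == 0
--     index_to_remove = []
--     chars = []
--     for left in to_replace_pairs.keys():
--         if left < 2:
--             continue
--         if content[left-2] == '\\':
--             if content[left-1] in 'KBTFX':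
--                 index_to_remove.append(to_replace_pairs[left])
--                 index_to_remove.extend([left, left-1, left-2])
--     chars = [content[i]
--              for i in range(len(content)) if i not in index_to_remove]
--     content = ''.join(chars)
--
--     return content
-- ===== SOURCE B (Python) =====
-- def process_char_bracket_fmt(content):
--     # One pass: emit chars into a buffer; a '{' preceded by \K/\B/\T/\F/\X
--     # retracts the two just-emitted chars and arms a flag so the matching '}'
--     # is skipped too.  A stray '}' raises IndexError, leftover '{' AssertionError,
--     # exactly as the original.
--     out = []
--     stack = []
--     for i, c in enumerate(content):
--         if c == '{':
--             if i >= 2 and content[i - 2] == '\\' and content[i - 1] in 'KBTFX':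
--                 out.pop()
--                 out.pop()
--                 stack.append(True)
--             else:
--                 out.append(c)
--                 stack.append(False)
--         elif c == '}':
--             if not stack.pop():
--                 out.append(c)
--         else:
--             out.append(c)
--     assert not stack
--     return ''.join(out)
-- ===== Notes on version B (the rewrite author's own statement) =====
-- stated objective: simpler
-- what changed: Replaced A's three passes (stack-match all brace pairs into a dict, scan the dict to collect an index_to_remove list, then rebuild the string testing 'i not in index_to_remove' per char) by a single left-to-right pass that emits into a buffer, retracts the just-emitted backslash+letter when a triggered '{' arrives, and uses a boolean stack to skip the matching '}'.
-- outside the precondition, e.g. on process_char_bracket_fmt('}'): A raises IndexError, B raises IndexError; on process_char_bracket_fmt('{'): A raises AssertionError, B raises AssertionError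
import Mathlib
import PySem

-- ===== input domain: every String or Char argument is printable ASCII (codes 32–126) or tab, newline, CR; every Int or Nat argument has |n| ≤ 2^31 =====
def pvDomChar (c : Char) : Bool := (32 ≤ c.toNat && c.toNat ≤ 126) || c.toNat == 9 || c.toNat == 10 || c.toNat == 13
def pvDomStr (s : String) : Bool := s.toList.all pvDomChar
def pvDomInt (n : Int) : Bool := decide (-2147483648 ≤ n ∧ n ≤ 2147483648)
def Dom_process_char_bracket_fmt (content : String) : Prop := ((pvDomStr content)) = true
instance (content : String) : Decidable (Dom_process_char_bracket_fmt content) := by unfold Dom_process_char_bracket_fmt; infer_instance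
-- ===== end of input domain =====

-- B replaces A's three passes (match pairs into a dict, collect an index_to_remove list,
-- rebuild with an 'i not in list' test) by one pass with an output buffer and a flag stack;
-- objective: simpler.  Where the Pythons raise (stray '}': IndexError; leftover '{':
-- AssertionError) — and they raise on exactly the same inputs — both ports return "".

-- ===== PORT A =====
-- first loop of A: builds to_replace_pairs (dict) and to_match (stack of open positions);
-- none = IndexError from to_match.pop(-1) on an empty list
def pcbfTail1 : List Char → Int → PySem.Dict Int Int → List Int → Option (PySem.Dict Int Int × List Int)
  | [], _, d, m => some (d, m)
  | c :: rest, i, d, m =>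
    let dm : PySem.Dict Int Int × List Int :=
      if c = '{' then (d.insert i (-1), m ++ [i]) else (d, m)
    if c = '}' then
      match PySem.List.pop? dm.2 (-1) with
      | none => none
      | some (mi, m') => pcbfTail1 rest (i + 1) (dm.1.insert mi i) m'
    else pcbfTail1 rest (i + 1) dm.1 dm.2

-- second loop of A: for left in to_replace_pairs.keys(): ... building index_to_remove
def pcbfIndexToRemove (content : String) (d : PySem.Dict Int Int) : List Int :=
  d.keys.foldl (fun acc left =>
    if left < 2 then acc
    else if PySem.Str.pyGet? content (left - 2) = some '\\' then
      match PySem.Str.pyGet? content (left - 1) with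
      | some ch =>
        if ch ∈ (['K', 'B', 'T', 'F', 'X'] : List Char) then
          acc ++ [d.getD left (-1), left, left - 1, left - 2]
        else acc
      | none => acc
    else acc) []

-- third pass of A: [content[i] for i in range(len(content)) if i not in index_to_remove]
def pcbfChars (content : String) (idx : List Int) : List Char :=
  (PySem.List.pyRange 0 (PySem.Str.len content)).foldl
    (fun acc i => if i ∉ idx then acc ++ [(PySem.Str.pyGet? content i).getD ' '] else acc) []

def process_char_bracket_fmt (content : String) : String :=
  match pcbfTail1 content.toList 0 PySem.Dict.empty [] with
  | none => ""                        -- IndexError path: to_match.pop(-1) on an empty list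
  | some (d, to_match) =>
    if to_match.length = 0 then
      String.ofList (pcbfChars content (pcbfIndexToRemove content d))
    else ""                           -- AssertionError path

-- ===== PORT B =====
-- one pass over enumerate(content): output buffer + stack of booleans;
-- none = IndexError from stack.pop() on an empty list
def pcbfAltLoop (content : String) : List (Int × Char) → List Char → List Bool → Option (List Char × List Bool)
  | [], out, stack => some (out, stack)
  | (i, c) :: rest, out, stack =>
    if c = '{' then
      if 2 ≤ i ∧ PySem.Str.pyGet? content (i - 2) = some '\\' ∧
          (PySem.Str.pyGet? content (i - 1)).any
            (fun ch => (['K', 'B', 'T', 'F', 'X'] : List Char).contains ch) = true then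
        -- out.pop(); out.pop()  (the '\' and the letter are still the last two buffered chars)
        pcbfAltLoop content rest out.dropLast.dropLast (stack ++ [true])
      else
        pcbfAltLoop content rest (out ++ [c]) (stack ++ [false])
    else if c = '}' then
      match PySem.List.pop? stack (-1) with
      | none => none
      | some (b, stack') => pcbfAltLoop content rest (if b then out else out ++ [c]) stack'
    else
      pcbfAltLoop content rest (out ++ [c]) stack

def process_char_bracket_fmt_alt (content : String) : String :=
  match pcbfAltLoop content (PySem.List.enumerate content.toList) [] [] with
  | none => ""                        -- IndexError path
  | some (out, stack) => if stack.isEmpty then String.ofList out else ""   -- AssertionError path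

-- ===== PRECONDITION & SPEC =====
-- exactly the inputs on which Python A returns: brace-balanced content (a stray '}' raises
-- IndexError, a leftover '{' raises AssertionError; B raises the same exceptions there)
def Pre_process_char_bracket_fmt (content : String) : Prop :=
  content.toList.count '{' = content.toList.count '}' ∧
  ∀ k ∈ List.range content.toList.length,
    (content.toList.take k).count '}' ≤ (content.toList.take k).count '{'
instance (content : String) : Decidable (Pre_process_char_bracket_fmt content) := by
  unfold Pre_process_char_bracket_fmt; infer_instance
def pvWitness_process_char_bracket_fmt : String := "\\K{ab}"

def Spec_process_char_bracket_fmt (content : String) (out : String) : Prop := out = process_char_bracket_fmt_alt content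
instance (content : String) (out : String) : Decidable (Spec_process_char_bracket_fmt content out) := by unfold Spec_process_char_bracket_fmt; infer_instance

-- ===== CLAIM (what is proved, stated in full; the proofs are below) =====
def Claim_equal_process_char_bracket_fmt : Prop := ∀ (content : String), Dom_process_char_bracket_fmt content → Pre_process_char_bracket_fmt content → Spec_process_char_bracket_fmt content (process_char_bracket_fmt content)

-- ===== LEMMAS AND PROOFS =====

-- B's trigger test as a boolean function of the position
def pvTrig (content : String) (k : Int) : Bool :=
  decide (2 ≤ k) && (PySem.Str.pyGet? content (k - 2) == some '\\') &&
    (PySem.Str.pyGet? content (k - 1)).any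
      (fun ch => (['K', 'B', 'T', 'F', 'X'] : List Char).contains ch)

-- "position j is removed" as seen from A's dict state d
def pvRem (content : String) (d : PySem.Dict Int Int) (j : Int) : Bool :=
  d.keys.any (fun k => pvTrig content k &&
    (j == k || j == k - 1 || j == k - 2 || (d.getD k (-1) == j && !(j == -1))))

-- the kept characters among the first p positions
def pvKept (content : String) (d : PySem.Dict Int Int) (p : Nat) : List Char :=
  (List.range p).filterMap
    (fun (j : Nat) => if pvRem content d ((j : Nat) : Int) = true then none else content.toList[j]?)

-- the simulation invariant between A's state (d, ms) and B's buffer out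
def pvInv (content : String) (p : Nat) (d : PySem.Dict Int Int) (ms : List Nat) (out : List Char) : Prop :=
  d.keys.Nodup ∧ ms.Nodup ∧
  (∀ ℓ ∈ ms, ℓ < p ∧ content.toList[ℓ]? = some '{' ∧ ((ℓ : Int) ∈ d.keys) ∧ d.getD (ℓ : Int) (-1) = -1) ∧
  (∀ k ∈ d.keys, ∃ ℓ : Nat, k = (ℓ : Int) ∧ ℓ < p ∧ content.toList[ℓ]? = some '{') ∧
  (∀ k ∈ d.keys, d.getD k (-1) = -1 ∨ ∃ v : Nat, d.getD k (-1) = (v : Int) ∧ v < p ∧ content.toList[v]? = some '}') ∧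
  out = pvKept content d p

lemma pv_bool_ext {a b : Bool} (h : a = true ↔ b = true) : a = b := by
  cases a <;> cases b <;> simp_all

lemma pv_bool_false {b : Bool} (h : ¬ b = true) : b = false := by
  cases b
  · rfl
  · exact absurd rfl h

lemma pvTrig_iff_cond (content : String) (i : Int) :
    pvTrig content i = true ↔
      (2 ≤ i ∧ PySem.Str.pyGet? content (i - 2) = some '\\' ∧
        (PySem.Str.pyGet? content (i - 1)).any
          (fun ch => (['K', 'B', 'T', 'F', 'X'] : List Char).contains ch) = true) := by
  simp [pvTrig, Bool.and_eq_true, beq_iff_eq, and_assoc]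

lemma pvTrig_elim (content : String) (p : Nat) (h : pvTrig content (p : Int) = true) :
    2 ≤ p ∧ content.toList[p - 2]? = some '\\' ∧
      ∃ ch, content.toList[p - 1]? = some ch ∧ ch ∈ (['K', 'B', 'T', 'F', 'X'] : List Char) := by
  rw [pvTrig_iff_cond] at h
  obtain ⟨h2, hbs, hany⟩ := h
  have hp2 : 2 ≤ p := by exact_mod_cast h2
  have e2 : ((p : Int) - 2) = ((p - 2 : Nat) : Int) := by omega
  have e1 : ((p : Int) - 1) = ((p - 1 : Nat) : Int) := by omega
  rw [e2, PySem.Str.pyGet?_natCast] at hbs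
  rw [e1, PySem.Str.pyGet?_natCast] at hany
  refine ⟨hp2, hbs, ?_⟩
  rcases ho : content.toList[p - 1]? with _ | ch
  · rw [ho] at hany; simp [Option.any] at hany
  · rw [ho] at hany
    simp only [Option.any] at hany
    exact ⟨ch, rfl, by simpa using hany⟩

lemma pvRem_iff (content : String) (d : PySem.Dict Int Int) (j : Int) :
    pvRem content d j = true ↔
      ∃ k ∈ d.keys, pvTrig content k = true ∧
        (j = k ∨ j = k - 1 ∨ j = k - 2 ∨ (d.getD k (-1) = j ∧ j ≠ -1)) := by
  simp only [pvRem, List.any_eq_true, Bool.and_eq_true, Bool.or_eq_true, beq_iff_eq,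
    Bool.not_eq_true', beq_eq_false_iff_ne, ne_eq]
  constructor
  · rintro ⟨k, hk, htr, hc⟩
    exact ⟨k, hk, htr, by tauto⟩
  · rintro ⟨k, hk, htr, hc⟩
    exact ⟨k, hk, htr, by tauto⟩

-- generic "position j is not removed" argument
lemma pvRem_false_of (content : String) (d : PySem.Dict Int Int) (p : Nat)
    (h4 : ∀ k ∈ d.keys, ∃ ℓ : Nat, k = (ℓ : Int) ∧ ℓ < p ∧ content.toList[ℓ]? = some '{')
    (h5 : ∀ k ∈ d.keys, d.getD k (-1) = -1 ∨ ∃ v : Nat, d.getD k (-1) = (v : Int) ∧ v < p ∧ content.toList[v]? = some '}')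
    (j : Nat)
    (hA : ∀ ℓ : Nat, ℓ < p → content.toList[ℓ]? = some '{' →
      (j : Int) ≠ (ℓ : Int) ∧ (j : Int) ≠ (ℓ : Int) - 1 ∧ (j : Int) ≠ (ℓ : Int) - 2)
    (hB : ∀ v : Nat, v < p → content.toList[v]? = some '}' → j ≠ v) :
    pvRem content d (j : Int) = false := by
  rw [← Bool.not_eq_true, pvRem_iff]
  rintro ⟨k, hk, htr, hcase⟩
  obtain ⟨ℓ, rfl, hℓp, hℓc⟩ := h4 k hk
  rcases hcase with h | h | h | ⟨hv, hne⟩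
  · exact (hA ℓ hℓp hℓc).1 h
  · exact (hA ℓ hℓp hℓc).2.1 h
  · exact (hA ℓ hℓp hℓc).2.2 h
  · rcases h5 _ hk with h0 | ⟨v, hgv, hvp, hvc⟩
    · rw [h0] at hv; omega
    · rw [hgv] at hv
      exact hB v hvp hvc (by exact_mod_cast hv.symm)

lemma pvKept_congr (content : String) (d₁ d₂ : PySem.Dict Int Int) (p : Nat)
    (h : ∀ j : Nat, j < p → pvRem content d₁ (j : Int) = pvRem content d₂ (j : Int)) :
    pvKept content d₁ p = pvKept content d₂ p := by
  unfold pvKept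
  exact List.filterMap_congr (fun j hj => by rw [h j (List.mem_range.mp hj)])

lemma pvKept_succ (content : String) (d : PySem.Dict Int Int) (p : Nat) :
    pvKept content d (p + 1) =
      pvKept content d p ++ (if pvRem content d (p : Int) = true then [] else (content.toList[p]?).toList) := by
  unfold pvKept
  rw [List.range_succ, List.filterMap_append]
  rcases h : pvRem content d ((p : Nat) : Int) with _ | _ <;>
    rcases ho : content.toList[p]? with _ | c <;>
      simp [h, ho]

-- reduction lemmas for port A's loop
lemma tail1_open (rest : List Char) (i : Int) (d : PySem.Dict Int Int) (m : List Int) :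
    pcbfTail1 ('{' :: rest) i d m = pcbfTail1 rest (i + 1) (d.insert i (-1)) (m ++ [i]) := by
  simp [pcbfTail1]

lemma tail1_close (rest : List Char) (i : Int) (d : PySem.Dict Int Int) (m : List Int) :
    pcbfTail1 ('}' :: rest) i d m =
      (match PySem.List.pop? m (-1) with
        | none => none
        | some (mi, m') => pcbfTail1 rest (i + 1) (d.insert mi i) m') := by
  simp [pcbfTail1]

lemma tail1_other (c : Char) (rest : List Char) (i : Int) (d : PySem.Dict Int Int) (m : List Int)
    (h1 : c ≠ '{') (h2 : c ≠ '}') :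
    pcbfTail1 (c :: rest) i d m = pcbfTail1 rest (i + 1) d m := by
  simp [pcbfTail1, h1, h2]

-- reduction lemmas for port B's loop
lemma altLoop_open_trig (content : String) (rest : List (Int × Char)) (i : Int) (out : List Char)
    (st : List Bool) (h : pvTrig content i = true) :
    pcbfAltLoop content ((i, '{') :: rest) out st =
      pcbfAltLoop content rest out.dropLast.dropLast (st ++ [true]) := by
  have hcond := (pvTrig_iff_cond content i).mp h
  simp only [pcbfAltLoop]
  rw [if_pos trivial, if_pos hcond]

lemma altLoop_open_notrig (content : String) (rest : List (Int × Char)) (i : Int) (out : List Char)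
    (st : List Bool) (h : pvTrig content i = false) :
    pcbfAltLoop content ((i, '{') :: rest) out st =
      pcbfAltLoop content rest (out ++ ['{']) (st ++ [false]) := by
  simp only [pcbfAltLoop]
  rw [if_pos trivial, if_neg (fun hc => by rw [(pvTrig_iff_cond content i).mpr hc] at h; cases h)]

lemma altLoop_close (content : String) (rest : List (Int × Char)) (i : Int) (out : List Char)
    (st : List Bool) :
    pcbfAltLoop content ((i, '}') :: rest) out st =
      (match PySem.List.pop? st (-1) with
        | none => none
        | some (b, st') => pcbfAltLoop content rest (if b then out else out ++ ['}']) st') := by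
  simp [pcbfAltLoop]

lemma altLoop_other (content : String) (rest : List (Int × Char)) (i : Int) (c : Char)
    (out : List Char) (st : List Bool) (h1 : c ≠ '{') (h2 : c ≠ '}') :
    pcbfAltLoop content ((i, c) :: rest) out st = pcbfAltLoop content rest (out ++ [c]) st := by
  simp [pcbfAltLoop, h1, h2]

lemma pvRem_insert_fresh_iff (content : String) (d : PySem.Dict Int Int) (p : Nat)
    (hfresh : ((p : Int)) ∉ d.keys) (j : Int) :
    pvRem content (d.insert (p : Int) (-1)) j = true ↔
      (pvRem content d j = true ∨
        (pvTrig content (p : Int) = true ∧ (j = (p : Int) ∨ j = (p : Int) - 1 ∨ j = (p : Int) - 2))) := by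
  have hcont : d.contains (p : Int) = false := by
    rcases hc : d.contains (p : Int)
    · rfl
    · exact absurd ((PySem.Dict.contains_iff_mem_keys d _).mp hc) hfresh
  have hkeys := PySem.Dict.keys_insert_of_not_contains d (-1 : Int) hcont
  rw [pvRem_iff, pvRem_iff]
  constructor
  · rintro ⟨k, hk, htr, hcase⟩
    rw [hkeys, List.mem_append] at hk
    rcases hk with hk | hk
    · left
      refine ⟨k, hk, htr, ?_⟩
      have hne : k ≠ (p : Int) := by rintro rfl; exact hfresh hk
      rcases hcase with h | h | h | ⟨hv, hne'⟩
      · tauto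
      · tauto
      · tauto
      · rw [PySem.Dict.getD_insert, if_neg hne] at hv
        exact Or.inr (Or.inr (Or.inr ⟨hv, hne'⟩))
    · simp only [List.mem_singleton] at hk
      subst hk
      right
      refine ⟨htr, ?_⟩
      rcases hcase with h | h | h | ⟨hv, hne'⟩
      · tauto
      · tauto
      · tauto
      · rw [PySem.Dict.getD_insert, if_pos rfl] at hv
        omega
  · rintro (⟨k, hk, htr, hcase⟩ | ⟨htr, hcase⟩)
    · have hne : k ≠ (p : Int) := by rintro rfl; exact hfresh hk
      refine ⟨k, by rw [hkeys]; exact List.mem_append_left _ hk, htr, ?_⟩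
      rcases hcase with h | h | h | ⟨hv, hne'⟩
      · tauto
      · tauto
      · tauto
      · rw [PySem.Dict.getD_insert, if_neg hne]
        exact Or.inr (Or.inr (Or.inr ⟨hv, hne'⟩))
    · refine ⟨(p : Int), by rw [hkeys]; exact List.mem_append_right _ (List.mem_singleton_self _), htr, ?_⟩
      tauto

lemma pvRem_insert_close_iff (content : String) (d : PySem.Dict Int Int) (ℓ p : Nat)
    (hmem : ((ℓ : Int)) ∈ d.keys) (hold : d.getD (ℓ : Int) (-1) = -1) (j : Int) :
    pvRem content (d.insert (ℓ : Int) (p : Int)) j = true ↔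
      (pvRem content d j = true ∨ (pvTrig content (ℓ : Int) = true ∧ j = (p : Int))) := by
  have hcont : d.contains (ℓ : Int) = true := (PySem.Dict.contains_iff_mem_keys d _).mpr hmem
  have hkeys := PySem.Dict.keys_insert_of_contains d (p : Int) hcont
  rw [pvRem_iff, pvRem_iff]
  constructor
  · rintro ⟨k, hk, htr, hcase⟩
    rw [hkeys] at hk
    by_cases hke : k = (ℓ : Int)
    · subst hke
      rcases hcase with h | h | h | ⟨hv, hne'⟩
      · exact Or.inl ⟨(ℓ : Int), hk, htr, by tauto⟩
      · exact Or.inl ⟨(ℓ : Int), hk, htr, by tauto⟩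
      · exact Or.inl ⟨(ℓ : Int), hk, htr, by tauto⟩
      · rw [PySem.Dict.getD_insert, if_pos rfl] at hv
        exact Or.inr ⟨htr, hv.symm⟩
    · rw [PySem.Dict.getD_insert, if_neg hke] at hcase
      exact Or.inl ⟨k, hk, htr, hcase⟩
  · rintro (⟨k, hk, htr, hcase⟩ | ⟨htr, rfl⟩)
    · refine ⟨k, by rw [hkeys]; exact hk, htr, ?_⟩
      by_cases hke : k = (ℓ : Int)
      · subst hke
        rcases hcase with h | h | h | ⟨hv, hne'⟩
        · tauto
        · tauto
        · tauto
        · rw [hold] at hv; omega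
      · rw [PySem.Dict.getD_insert, if_neg hke]
        exact hcase
    · refine ⟨(ℓ : Int), by rw [hkeys]; exact hmem, htr, ?_⟩
      rw [PySem.Dict.getD_insert, if_pos rfl]
      exact Or.inr (Or.inr (Or.inr ⟨rfl, by omega⟩))

lemma pv_letter_ne (ch : Char) (h : ch ∈ (['K', 'B', 'T', 'F', 'X'] : List Char)) :
    ch ≠ '{' ∧ ch ≠ '}' := by
  fin_cases h <;> exact ⟨by decide, by decide⟩

-- ===== the main simulation =====
lemma pvSim (content : String) :
    ∀ (k p : Nat) (d : PySem.Dict Int Int) (ms : List Nat) (out : List Char),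
    p + k = content.toList.length →
    pvInv content p d ms out →
    (pcbfTail1 (content.toList.drop p) ((p : Nat) : Int) d (ms.map (fun ℓ => ((ℓ : Nat) : Int))) = none ∧
     pcbfAltLoop content (PySem.List.enumerate (content.toList.drop p) ((p : Nat) : Int)) out
       (ms.map (fun ℓ => pvTrig content ((ℓ : Nat) : Int))) = none) ∨
    (∃ d' ms' out',
      pcbfTail1 (content.toList.drop p) ((p : Nat) : Int) d (ms.map (fun ℓ => ((ℓ : Nat) : Int))) =
        some (d', ms'.map (fun ℓ => ((ℓ : Nat) : Int))) ∧
      pcbfAltLoop content (PySem.List.enumerate (content.toList.drop p) ((p : Nat) : Int)) out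
        (ms.map (fun ℓ => pvTrig content ((ℓ : Nat) : Int))) =
        some (out', ms'.map (fun ℓ => pvTrig content ((ℓ : Nat) : Int))) ∧
      pvInv content content.toList.length d' ms' out') := by
  intro k
  induction k with
  | zero =>
    intro p d ms out hlen hinv
    have hp : p = content.toList.length := by omega
    right
    refine ⟨d, ms, out, ?_, ?_, by rwa [hp] at hinv⟩
    · rw [hp, List.drop_length]; rfl
    · rw [hp, List.drop_length, PySem.List.enumerate_nil]; rfl
  | succ k ih =>
    intro p d ms out hlen hinv
    have hpn : p < content.toList.length := by omega
    have hdrop : content.toList.drop p = content.toList[p] :: content.toList.drop (p + 1) :=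
      List.drop_eq_getElem_cons hpn
    have hcget : content.toList[p]? = some (content.toList[p]) := List.getElem?_eq_getElem hpn
    obtain ⟨h1, h2, h3, h4, h5, h6⟩ := hinv
    have hfresh : ((p : Int)) ∉ d.keys := by
      intro hk
      obtain ⟨ℓ, he, hℓp, _⟩ := h4 _ hk
      omega
    have hcast1 : ((p : Int) + 1) = (((p + 1 : Nat)) : Int) := by push_cast; ring
    rw [hdrop]
    by_cases hco : content.toList[p] = '{'
    · -- an opening brace
      have hnodup' : (ms ++ [p]).Nodup := by
        refine List.Nodup.append h2 (List.nodup_singleton p) ?_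
        intro x hx hx'
        simp only [List.mem_singleton] at hx'
        subst hx'
        exact absurd (h3 x hx).1 (by omega)
      have hcont : d.contains (p : Int) = false := by
        rcases hc : d.contains (p : Int)
        · rfl
        · exact absurd ((PySem.Dict.contains_iff_mem_keys d _).mp hc) hfresh
      have hkeys' := PySem.Dict.keys_insert_of_not_contains d (-1 : Int) hcont
      have hinv345 : ∀ q : Nat, p < q →
          (∀ ℓ ∈ ms ++ [p], ℓ < q ∧ content.toList[ℓ]? = some '{' ∧
            ((ℓ : Int) ∈ (d.insert (p : Int) (-1)).keys) ∧ (d.insert (p : Int) (-1)).getD (ℓ : Int) (-1) = -1) ∧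
          (∀ kk ∈ (d.insert (p : Int) (-1)).keys, ∃ ℓ : Nat, kk = (ℓ : Int) ∧ ℓ < q ∧ content.toList[ℓ]? = some '{') ∧
          (∀ kk ∈ (d.insert (p : Int) (-1)).keys, (d.insert (p : Int) (-1)).getD kk (-1) = -1 ∨
            ∃ v : Nat, (d.insert (p : Int) (-1)).getD kk (-1) = (v : Int) ∧ v < q ∧ content.toList[v]? = some '}') := by
        intro q hq
        refine ⟨?_, ?_, ?_⟩
        · intro ℓ hℓ
          rcases List.mem_append.mp hℓ with hℓ | hℓ
          · obtain ⟨ha, hb, hc, hd⟩ := h3 ℓ hℓ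
            have hne : ((ℓ : Int)) ≠ ((p : Int)) := by omega
            refine ⟨by omega, hb, ?_, ?_⟩
            · rw [hkeys']; exact List.mem_append_left _ hc
            · rw [PySem.Dict.getD_insert, if_neg hne]; exact hd
          · simp only [List.mem_singleton] at hℓ
            subst hℓ
            refine ⟨hq, by rw [hcget, hco], ?_, ?_⟩
            · rw [hkeys']; exact List.mem_append_right _ (List.mem_singleton_self _)
            · rw [PySem.Dict.getD_insert, if_pos rfl]
        · intro kk hkk
          rw [hkeys', List.mem_append] at hkk
          rcases hkk with hkk | hkk
          · obtain ⟨ℓ, he, hb, hc⟩ := h4 _ hkk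
            exact ⟨ℓ, he, by omega, hc⟩
          · simp only [List.mem_singleton] at hkk
            exact ⟨p, hkk, hq, by rw [hcget, hco]⟩
        · intro kk hkk
          rw [hkeys', List.mem_append] at hkk
          rcases hkk with hkk | hkk
          · have hne : kk ≠ ((p : Int)) := by rintro rfl; exact hfresh hkk
            rw [PySem.Dict.getD_insert, if_neg hne]
            rcases h5 _ hkk with h | ⟨v, ha, hb, hc⟩
            · exact Or.inl h
            · exact Or.inr ⟨v, ha, by omega, hc⟩
          · simp only [List.mem_singleton] at hkk
            subst hkk
            rw [PySem.Dict.getD_insert, if_pos rfl]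
            exact Or.inl rfl
      rw [hco, tail1_open]
      rw [PySem.List.enumerate_cons]
      rcases htr : pvTrig content ((p : Nat) : Int) with _ | _
      · -- non-triggered '{': both emit/record it
        rw [altLoop_open_notrig content _ _ _ _ htr]
        have hrem_p : pvRem content d ((p : Nat) : Int) = false := by
          apply pvRem_false_of content d p h4 h5 p
          · intro ℓ hℓ _; refine ⟨by omega, by omega, by omega⟩
          · intro v hv _; omega
        have hout' : out ++ ['{'] = pvKept content (d.insert (p : Int) (-1)) (p + 1) := by
          have hcg : ∀ j : Nat, j < p + 1 →
              pvRem content (d.insert (p : Int) (-1)) (j : Int) = pvRem content d (j : Int) := by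
            intro j _
            apply pv_bool_ext
            rw [pvRem_insert_fresh_iff content d p hfresh]
            constructor
            · rintro (h | ⟨ht, _⟩)
              · exact h
              · rw [ht] at htr; cases htr
            · exact Or.inl
          rw [pvKept_succ, hcg p (by omega), hrem_p]
          simp only [if_neg (by simp : ¬ (false = true)), hcget, hco, Option.toList_some]
          rw [h6]
          congr 1
          exact (pvKept_congr content _ d p (fun j hj => hcg j (by omega))).symm
        have hrec := ih (p + 1) (d.insert (p : Int) (-1)) (ms ++ [p]) (out ++ ['{'])
          (by omega) ⟨PySem.Dict.nodup_keys_insert d _ _ h1, hnodup',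
            (hinv345 (p + 1) (by omega)).1, (hinv345 (p + 1) (by omega)).2.1,
            (hinv345 (p + 1) (by omega)).2.2, hout'⟩
        rw [← hcast1] at hrec
        simpa [List.map_append, htr] using hrec
      · -- triggered '{': B retracts the '\' and the letter, A records the pair
        rw [altLoop_open_trig content _ _ _ _ htr]
        obtain ⟨hp2, hbs, ch, hch, hchmem⟩ := pvTrig_elim content p htr
        obtain ⟨hch1, hch2⟩ := pv_letter_ne ch hchmem
        have hbs1 : ('\\' : Char) ≠ '{' := by decide
        have hbs2 : ('\\' : Char) ≠ '}' := by decide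
        have hrem1 : pvRem content d ((p - 1 : Nat) : Int) = false := by
          apply pvRem_false_of content d p h4 h5 (p - 1)
          · intro ℓ hℓ hcℓ
            refine ⟨?_, by omega, by omega⟩
            intro he
            have : ℓ = p - 1 := by omega
            subst this
            rw [hch] at hcℓ
            exact hch1 (Option.some.inj hcℓ)
          · intro v hv hcv
            intro he
            subst he
            rw [hch] at hcv
            exact hch2 (Option.some.inj hcv)
        have hrem2 : pvRem content d ((p - 2 : Nat) : Int) = false := by
          apply pvRem_false_of content d p h4 h5 (p - 2)
          · intro ℓ hℓ hcℓ
            refine ⟨?_, ?_, by omega⟩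
            · intro he
              have : ℓ = p - 2 := by omega
              subst this
              rw [hbs] at hcℓ
              exact hbs1 (Option.some.inj hcℓ)
            · intro he
              have : ℓ = p - 1 := by omega
              subst this
              rw [hch] at hcℓ
              exact hch1 (Option.some.inj hcℓ)
          · intro v hv hcv
            intro he
            subst he
            rw [hbs] at hcv
            exact hbs2 (Option.some.inj hcv)
        have hsplit : pvKept content d p = (pvKept content d (p - 2) ++ ['\\']) ++ [ch] := by
          calc pvKept content d p = pvKept content d ((p - 1) + 1) := by
                congr 1; omega
            _ = pvKept content d (p - 1) ++ [ch] := by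
                rw [pvKept_succ, hrem1]
                simp [hch]
            _ = pvKept content d ((p - 2) + 1) ++ [ch] := by
                congr 2; omega
            _ = (pvKept content d (p - 2) ++ ['\\']) ++ [ch] := by
                rw [pvKept_succ, hrem2]
                simp [hbs]
        have hdrop2 : out.dropLast.dropLast = pvKept content d (p - 2) := by
          rw [h6, hsplit, List.dropLast_concat, List.dropLast_concat]
        have hcg : ∀ j : Nat, j < p - 2 →
            pvRem content (d.insert (p : Int) (-1)) (j : Int) = pvRem content d (j : Int) := by
          intro j hj
          apply pv_bool_ext
          rw [pvRem_insert_fresh_iff content d p hfresh]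
          constructor
          · rintro (h | ⟨_, h | h | h⟩)
            · exact h
            · omega
            · omega
            · omega
          · exact Or.inl
        have hrem_top : ∀ j : Nat, p - 2 ≤ j → j ≤ p →
            pvRem content (d.insert (p : Int) (-1)) (j : Int) = true := by
          intro j hj1 hj2
          rw [pvRem_insert_fresh_iff content d p hfresh]
          right
          exact ⟨htr, by omega⟩
        have hout' : out.dropLast.dropLast = pvKept content (d.insert (p : Int) (-1)) (p + 1) := by
          set D := d.insert (p : Int) (-1) with hD
          have k3 : pvKept content D (p + 1) = pvKept content D p := by
            rw [pvKept_succ, hrem_top p (by omega) (by omega)]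
            simp
          have k2 : pvKept content D p = pvKept content D (p - 1) := by
            conv_lhs => rw [show p = (p - 1) + 1 from by omega]
            rw [pvKept_succ, hrem_top (p - 1) (by omega) (by omega)]
            simp
          have k1 : pvKept content D (p - 1) = pvKept content D (p - 2) := by
            conv_lhs => rw [show p - 1 = (p - 2) + 1 from by omega]
            rw [pvKept_succ, hrem_top (p - 2) (by omega) (by omega)]
            simp
          rw [hdrop2, k3, k2, k1]
          exact pvKept_congr content d D (p - 2) (fun j hj => (hcg j hj).symm)
        have hrec := ih (p + 1) (d.insert (p : Int) (-1)) (ms ++ [p]) out.dropLast.dropLast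
          (by omega) ⟨PySem.Dict.nodup_keys_insert d _ _ h1, hnodup',
            (hinv345 (p + 1) (by omega)).1, (hinv345 (p + 1) (by omega)).2.1,
            (hinv345 (p + 1) (by omega)).2.2, hout'⟩
        rw [← hcast1] at hrec
        simpa [List.map_append, htr] using hrec
    · by_cases hcc : content.toList[p] = '}'
      · -- a closing brace
        rw [hcc, tail1_close]
        rw [PySem.List.enumerate_cons, altLoop_close]
        rcases List.eq_nil_or_concat ms with rfl | ⟨ms₀, ℓ, hms⟩
        · -- stray '}': both raise IndexError
          left
          constructor
          · simp [PySem.List.pop?]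
          · simp [PySem.List.pop?]
        · rw [List.concat_eq_append] at hms
          subst hms
          obtain ⟨hℓp, hℓc, hℓk, hℓv⟩ := h3 ℓ (by simp)
          have hmap1 : (ms₀ ++ [ℓ]).map (fun ℓ => ((ℓ : Nat) : Int)) =
              (ms₀.map (fun ℓ => ((ℓ : Nat) : Int))) ++ [((ℓ : Nat) : Int)] := by simp
          have hmap2 : (ms₀ ++ [ℓ]).map (fun ℓ => pvTrig content ((ℓ : Nat) : Int)) =
              (ms₀.map (fun ℓ => pvTrig content ((ℓ : Nat) : Int))) ++ [pvTrig content ((ℓ : Nat) : Int)] := by simp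
          rw [hmap1, hmap2, PySem.List.pop?_last, PySem.List.pop?_last]
          have hnodup₀ : ms₀.Nodup := (List.nodup_append.mp h2).1
          have hnotmem : ℓ ∉ ms₀ := by
            have hrev : (ℓ :: ms₀.reverse).Nodup := by
              have h2r := List.nodup_reverse.mpr h2
              simpa using h2r
            intro hx
            exact (List.nodup_cons.mp hrev).1 (List.mem_reverse.mpr hx)
          have hremiff := pvRem_insert_close_iff content d ℓ p hℓk hℓv
          have hrem_p : pvRem content d ((p : Nat) : Int) = false := by
            apply pvRem_false_of content d p h4 h5 p
            · intro ℓ' hℓ' _; refine ⟨by omega, by omega, by omega⟩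
            · intro v hv _; omega
          have hcgP : ∀ j : Nat, j < p →
              pvRem content (d.insert (ℓ : Int) (p : Int)) (j : Int) = pvRem content d (j : Int) := by
            intro j hj
            apply pv_bool_ext
            rw [hremiff]
            constructor
            · rintro (h | ⟨_, h⟩)
              · exact h
              · omega
            · exact Or.inl
          have hrem_top' : pvRem content (d.insert (ℓ : Int) (p : Int)) ((p : Nat) : Int) =
              pvTrig content ((ℓ : Nat) : Int) := by
            apply pv_bool_ext
            rw [hremiff]
            constructor
            · rintro (h | ⟨ht, _⟩)
              · rw [hrem_p] at h; cases h
              · exact ht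
            · intro ht
              exact Or.inr ⟨ht, rfl⟩
          have hout' : (if pvTrig content ((ℓ : Nat) : Int) then out else out ++ ['}']) =
              pvKept content (d.insert (ℓ : Int) (p : Int)) (p + 1) := by
            rw [pvKept_succ, hrem_top']
            have hkp : pvKept content (d.insert (ℓ : Int) (p : Int)) p = out := by
              rw [h6]
              exact pvKept_congr content _ d p hcgP
            rw [hkp]
            rcases htr' : pvTrig content ((ℓ : Nat) : Int) with _ | _
            · simp [hcget, hcc]
            · simp
          have hinv' : pvInv content (p + 1) (d.insert (ℓ : Int) (p : Int)) ms₀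
              (if pvTrig content ((ℓ : Nat) : Int) then out else out ++ ['}']) := by
            have hcontℓ : d.contains (ℓ : Int) = true := (PySem.Dict.contains_iff_mem_keys d _).mpr hℓk
            have hkeysℓ := PySem.Dict.keys_insert_of_contains d ((p : Nat) : Int) hcontℓ
            refine ⟨by rw [hkeysℓ]; exact h1, hnodup₀, ?_, ?_, ?_, hout'⟩
            · intro ℓ' hℓ'
              obtain ⟨ha, hb, hc, hd⟩ := h3 ℓ' (List.mem_append_left _ hℓ')
              have hne : ((ℓ' : Int)) ≠ ((ℓ : Int)) := by
                intro he
                have : ℓ' = ℓ := by omega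
                exact hnotmem (this ▸ hℓ')
              refine ⟨by omega, hb, by rw [hkeysℓ]; exact hc, ?_⟩
              rw [PySem.Dict.getD_insert, if_neg hne]
              exact hd
            · intro kk hkk
              rw [hkeysℓ] at hkk
              obtain ⟨ℓ'', he, hb, hc⟩ := h4 _ hkk
              exact ⟨ℓ'', he, by omega, hc⟩
            · intro kk hkk
              rw [hkeysℓ] at hkk
              by_cases hke : kk = ((ℓ : Int))
              · subst hke
                rw [PySem.Dict.getD_insert, if_pos rfl]
                exact Or.inr ⟨p, rfl, by omega, by rw [hcget, hcc]⟩
              · rw [PySem.Dict.getD_insert, if_neg hke]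
                rcases h5 _ hkk with h | ⟨v, ha, hb, hc⟩
                · exact Or.inl h
                · exact Or.inr ⟨v, ha, by omega, hc⟩
          have hrec := ih (p + 1) (d.insert (ℓ : Int) (p : Int)) ms₀
            (if pvTrig content ((ℓ : Nat) : Int) then out else out ++ ['}']) (by omega) hinv'
          rw [← hcast1] at hrec
          simpa using hrec
      · -- any other character: both emit it
        rw [tail1_other _ _ _ _ _ hco hcc]
        rw [PySem.List.enumerate_cons, altLoop_other content _ _ _ _ _ hco hcc]
        have hrem_p : pvRem content d ((p : Nat) : Int) = false := by
          apply pvRem_false_of content d p h4 h5 p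
          · intro ℓ' hℓ' _; refine ⟨by omega, by omega, by omega⟩
          · intro v hv _; omega
        have hout' : out ++ [content.toList[p]] = pvKept content d (p + 1) := by
          rw [pvKept_succ, hrem_p, h6]
          simp [hcget]
        have hinv' : pvInv content (p + 1) d ms (out ++ [content.toList[p]]) := by
          refine ⟨h1, h2, ?_, ?_, ?_, hout'⟩
          · intro ℓ hℓ
            obtain ⟨ha, hb, hc, hd⟩ := h3 ℓ hℓ
            exact ⟨by omega, hb, hc, hd⟩
          · intro kk hkk
            obtain ⟨ℓ, he, hb, hc⟩ := h4 _ hkk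
            exact ⟨ℓ, he, by omega, hc⟩
          · intro kk hkk
            rcases h5 _ hkk with h | ⟨v, ha, hb, hc⟩
            · exact Or.inl h
            · exact Or.inr ⟨v, ha, by omega, hc⟩
        have hrec := ih (p + 1) d ms (out ++ [content.toList[p]]) (by omega) hinv'
        rw [← hcast1] at hrec
        exact hrec

-- membership in A's index_to_remove list
lemma pv_mem_idxFold (content : String) (d : PySem.Dict Int Int) :
    ∀ (keys : List Int) (acc : List Int) (j : Int),
      (j ∈ keys.foldl (fun acc left =>
        if left < 2 then acc
        else if PySem.Str.pyGet? content (left - 2) = some '\\' then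
          match PySem.Str.pyGet? content (left - 1) with
          | some ch =>
            if ch ∈ (['K', 'B', 'T', 'F', 'X'] : List Char) then
              acc ++ [d.getD left (-1), left, left - 1, left - 2]
            else acc
          | none => acc
        else acc) acc) ↔
      (j ∈ acc ∨ ∃ k ∈ keys, pvTrig content k = true ∧
        (j = d.getD k (-1) ∨ j = k ∨ j = k - 1 ∨ j = k - 2)) := by
  intro keys
  induction keys with
  | nil => intro acc j; simp
  | cons left keys ihk =>
    intro acc j
    rw [List.foldl_cons, ihk]
    have hstep : (j ∈ (if left < 2 then acc
        else if PySem.Str.pyGet? content (left - 2) = some '\\' then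
          match PySem.Str.pyGet? content (left - 1) with
          | some ch =>
            if ch ∈ (['K', 'B', 'T', 'F', 'X'] : List Char) then
              acc ++ [d.getD left (-1), left, left - 1, left - 2]
            else acc
          | none => acc
        else acc)) ↔
        (j ∈ acc ∨ (pvTrig content left = true ∧
          (j = d.getD left (-1) ∨ j = left ∨ j = left - 1 ∨ j = left - 2))) := by
      by_cases hl : left < 2
      · rw [if_pos hl]
        have htf : pvTrig content left = false :=
          pv_bool_false (by rw [pvTrig_iff_cond]; rintro ⟨h2c, -, -⟩; omega)
        simp [htf]
      · rw [if_neg hl]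
        by_cases hbs : PySem.Str.pyGet? content (left - 2) = some '\\'
        · rw [if_pos hbs]
          rcases ho : PySem.Str.pyGet? content (left - 1) with _ | ch
          · have htf : pvTrig content left = false :=
              pv_bool_false (by
                rw [pvTrig_iff_cond]
                rintro ⟨-, -, hanyc⟩
                rw [ho] at hanyc
                simp [Option.any] at hanyc)
            dsimp only
            simp [htf]
          · by_cases hmem : ch ∈ (['K', 'B', 'T', 'F', 'X'] : List Char)
            · have htr : pvTrig content left = true := by
                rw [pvTrig_iff_cond]
                refine ⟨by omega, hbs, ?_⟩
                rw [ho]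
                simp only [Option.any]
                simpa using hmem
              dsimp only
              rw [if_pos hmem]
              simp only [List.mem_append, htr, true_and]
              constructor
              · rintro (h | h)
                · exact Or.inl h
                · simp only [List.mem_cons, List.not_mem_nil, or_false] at h
                  exact Or.inr (by tauto)
              · rintro (h | h)
                · exact Or.inl h
                · right
                  simp only [List.mem_cons, List.not_mem_nil, or_false]
                  tauto
            · have htf : pvTrig content left = false :=
                pv_bool_false (by
                  rw [pvTrig_iff_cond]
                  rintro ⟨-, -, hanyc⟩
                  rw [ho] at hanyc
                  simp only [Option.any] at hanyc
                  exact hmem (by simpa using hanyc))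
              dsimp only
              rw [if_neg hmem]
              simp [htf]
        · rw [if_neg hbs]
          have htf : pvTrig content left = false :=
            pv_bool_false (by rw [pvTrig_iff_cond]; rintro ⟨-, hbsc, -⟩; exact hbs hbsc)
          simp [htf]
    rw [hstep]
    constructor
    · rintro (h | ⟨k, hk, hp⟩)
      · rcases h with h | h
        · exact Or.inl h
        · exact Or.inr ⟨left, List.mem_cons_self, h⟩
      · exact Or.inr ⟨k, List.mem_cons_of_mem _ hk, hp⟩
    · rintro (h | ⟨k, hk, hp⟩)
      · exact Or.inl (Or.inl h)
      · rcases List.mem_cons.mp hk with rfl | hk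
        · exact Or.inl (Or.inr hp)
        · exact Or.inr ⟨k, hk, hp⟩

lemma pv_mem_idx_iff (content : String) (d : PySem.Dict Int Int) (j : Nat) :
    ((j : Int) ∈ pcbfIndexToRemove content d) ↔ pvRem content d ((j : Nat) : Int) = true := by
  unfold pcbfIndexToRemove
  rw [pv_mem_idxFold, pvRem_iff]
  simp only [List.not_mem_nil, false_or]
  constructor
  · rintro ⟨k, hk, htr, hc⟩
    refine ⟨k, hk, htr, ?_⟩
    rcases hc with h | h | h | h
    · exact Or.inr (Or.inr (Or.inr ⟨h.symm, by omega⟩))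
    · tauto
    · tauto
    · tauto
  · rintro ⟨k, hk, htr, hc⟩
    refine ⟨k, hk, htr, ?_⟩
    rcases hc with h | h | h | ⟨h, _⟩
    · tauto
    · tauto
    · tauto
    · exact Or.inl h.symm

-- A's final comprehension equals the kept characters
lemma pv_chars_eq (content : String) (d : PySem.Dict Int Int) :
    pcbfChars content (pcbfIndexToRemove content d) = pvKept content d content.toList.length := by
  unfold pcbfChars
  have hlen : PySem.Str.len content = (content.toList.length : Int) := by
    simp [PySem.Str.len_eq]
  rw [hlen, PySem.List.pyRange_one]
  simp only [sub_zero, Int.toNat_natCast, zero_add, List.foldl_map]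
  have hgen : ∀ (n : Nat), n ≤ content.toList.length →
      List.foldl (fun acc (j : Nat) =>
        if ((j : Int)) ∉ pcbfIndexToRemove content d then
          acc ++ [(PySem.Str.pyGet? content ((j : Nat) : Int)).getD ' '] else acc)
        [] (List.range n) = pvKept content d n := by
    intro n
    induction n with
    | zero => intro _; simp [pvKept]
    | succ n ihn =>
      intro hn
      rw [List.range_succ, List.foldl_append, List.foldl_cons, List.foldl_nil, ihn (by omega),
        pvKept_succ]
      have hget : content.toList[n]? = some (content.toList[n]'(by omega)) :=
        List.getElem?_eq_getElem (by omega)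
      by_cases hmem : ((n : Int)) ∈ pcbfIndexToRemove content d
      · have hrem : pvRem content d ((n : Nat) : Int) = true := (pv_mem_idx_iff content d n).mp hmem
        rw [if_neg (by simpa using hmem), hrem]
        simp
      · have hrem : pvRem content d ((n : Nat) : Int) = false := by
          rcases hr : pvRem content d ((n : Nat) : Int)
          · rfl
          · exact absurd ((pv_mem_idx_iff content d n).mpr hr) hmem
        rw [if_pos hmem, hrem]
        simp only [if_neg (by simp : ¬ (false = true))]
        rw [PySem.Str.pyGet?_natCast, hget]
        simp
  exact hgen content.toList.length (le_refl _)

-- ===== VERDICT (by name: the statement is the Claim_ definition above) =====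
theorem process_char_bracket_fmt_spec : Claim_equal_process_char_bracket_fmt := by
  unfold Claim_equal_process_char_bracket_fmt
  intro content _hdom _hpre
  unfold Spec_process_char_bracket_fmt
  have hinv0 : pvInv content 0 PySem.Dict.empty [] [] := by
    refine ⟨?_, List.nodup_nil, ?_, ?_, ?_, ?_⟩
    · simp [PySem.Dict.keys_empty]
    · intro ℓ hℓ; cases hℓ
    · intro k hk; rw [PySem.Dict.keys_empty] at hk; cases hk
    · intro k hk; rw [PySem.Dict.keys_empty] at hk; cases hk
    · simp [pvKept]
  have h := pvSim content content.toList.length 0 PySem.Dict.empty [] [] (by omega) hinv0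
  simp only [List.drop_zero, Nat.cast_zero, List.map_nil] at h
  unfold process_char_bracket_fmt process_char_bracket_fmt_alt
  rcases h with ⟨hA, hB⟩ | ⟨d', ms', out', hA, hB, hinv⟩
  · rw [hA, hB]
  · rw [hA, hB]
    cases ms' with
    | nil =>
      simp only [List.map_nil, List.length_nil, List.isEmpty_nil]
      rw [if_pos trivial, if_pos trivial]
      obtain ⟨_, _, _, _, _, hout⟩ := hinv
      rw [hout, pv_chars_eq]
    | cons a ms'' =>
      simp
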